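-- pv_equiv track=rewrite | github.com/1possible/2bepi_othello | AIStrat.py | pionIntouchable
-- ===== SOURCE A (Python) =====
-- directionList = [(0,1),(0,-1),(1,0),(-1,0),(1,1),(-1,-1),(-1,1),(1,-1)]
--
-- def caseDacote(case, direction):
--     # revoie la case qui se trouve à coté dans la DIRECTION
--     # Parametre:
--     #   case        : int compris entre 0 et 63 inclus: case de référence
--     #   direction   : tuple avec comme premier élément -1,0,1 qui fait reference à la colonne
--     #                                  deuxiemme élément -1,0,1 qui fait référence à la ligne
--     #Return:
--     #   si la case demande se trouve en dehors des limite du plateau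
--     #       None
--     #   sinon
--     #       int: numeros de la case à coté de la case(en paramètre) dans la direction donnée
--     c = case%8
--     l = case//8
--     if ((c == 0 and direction[0]==-1) or (c==7 and direction[0] == 1)):
--         return None
--     elif ((l == 0 and direction[1]==-1) or (l==7 and direction[1] == 1)):
--         return None
--     else :
--         return (l + direction[1])*8 + c+direction[0]
--
-- def videInDir(place,dir, board):
--     place = caseDacote(place,dir)
--     if place in board[1]:
--         return False
--     elif place in board[0]:
--         return videInDir(place,dir,board)
--     elif place is None:
--         return True
--     else:
--         return False
--
-- def pionIntouchable(pion, board):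
--     dirImprenable = 0
--     for i in range(int(len(directionList)/2)):
--         if videInDir(pion,directionList[i*2],board):
--             dirImprenable +=1
--         elif videInDir(pion,directionList[i*2+1],board):
--             dirImprenable += 1
--
--     if dirImprenable==4:
--         return True
--     else:
--         return False
-- ===== SOURCE B (Python) =====
-- def caseDacote(case, direction):
--     c = case % 8
--     l = case // 8
--     if (c == 0 and direction[0] == -1) or (c == 7 and direction[0] == 1):
--         return None
--     if (l == 0 and direction[1] == -1) or (l == 7 and direction[1] == 1):
--         return None
--     return (l + direction[1]) * 8 + c + direction[0]
--
--
-- def pionIntouchable(pion, board):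
--     own, opp = board[0], board[1]
--
--     def edge_through_own(d):
--         # iterative walk: follow d through own pieces; True iff the edge is reached
--         cur = pion
--         while True:
--             nxt = caseDacote(cur, d)
--             if nxt is None:
--                 return True
--             if nxt in opp or nxt not in own:
--                 return False
--             cur = nxt
--
--     return all(edge_through_own(a) or edge_through_own(b)
--                for a, b in [((0, 1), (0, -1)), ((1, 0), (-1, 0)),
--                             ((1, 1), (-1, -1)), ((-1, 1), (1, -1))])
-- ===== Notes on version B (the rewrite author's own statement) =====
-- stated objective: simpler
-- what changed: Replaces the recursive videInDir with an explicit iterative while-loop walk per direction and replaces the counter-to-4 loop over directionList indices with an all() over the four explicit axis pairs.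
import Mathlib
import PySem

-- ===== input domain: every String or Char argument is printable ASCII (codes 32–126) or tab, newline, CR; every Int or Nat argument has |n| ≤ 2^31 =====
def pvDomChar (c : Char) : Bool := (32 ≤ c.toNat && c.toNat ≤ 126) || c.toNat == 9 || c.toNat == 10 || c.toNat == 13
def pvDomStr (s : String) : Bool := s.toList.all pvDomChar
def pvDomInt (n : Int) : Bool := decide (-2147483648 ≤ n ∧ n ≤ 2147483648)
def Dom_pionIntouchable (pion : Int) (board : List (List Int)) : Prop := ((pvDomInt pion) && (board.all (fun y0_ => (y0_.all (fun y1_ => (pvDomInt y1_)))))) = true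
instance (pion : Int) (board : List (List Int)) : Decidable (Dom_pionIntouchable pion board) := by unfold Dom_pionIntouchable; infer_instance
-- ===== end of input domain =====

-- B replaces A's recursive per-direction walk by an explicit iterative walk and the
-- counter-to-4 pair loop by an all() over the four axis pairs (objective: simpler).


-- ===== PORT A =====
def directionList : List (Int × Int) := [(0,1),(0,-1),(1,0),(-1,0),(1,1),(-1,-1),(-1,1),(1,-1)]

def caseDacote (case_ : Int) (direction : Int × Int) : Option Int :=
  let c := PySem.Int.mod case_ 8
  let l := PySem.Int.floordiv case_ 8
  if (c == 0 && direction.1 == -1) || (c == 7 && direction.1 == 1) then none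
  else if (l == 0 && direction.2 == -1) || (l == 7 && direction.2 == 1) then none
  else some ((l + direction.2) * 8 + c + direction.1)

-- Python's videInDir(place, dir, board); board[0]/board[1] are passed as b0/b1.
-- The recursion is given fuel b0.length + 1, which is always sufficient for the eight
-- directions pionIntouchable uses: each recursive step moves to a fresh cell of b0.
-- In the 'none' branch: None is not in board[1], not in board[0], and 'place is None'
-- holds, so Python returns True there.
def videInDir (fuel : Nat) (place : Int) (dir : Int × Int) (b0 b1 : List Int) : Bool :=
  match fuel with
  | 0 => false
  | fuel + 1 =>
    match caseDacote place dir with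
    | none => true
    | some p =>
      if p ∈ b1 then false
      else if p ∈ b0 then videInDir fuel p dir b0 b1
      else false

def pionIntouchable (pion : Int) (board : List (List Int)) : Bool :=
  -- board[0]/board[1]: Pre_ excludes boards of length < 2, where Python raises IndexError
  let b0 := (PySem.List.pyGet? board 0).getD []
  let b1 := (PySem.List.pyGet? board 1).getD []
  let fuel := b0.length + 1
  -- int(len(directionList)/2) = 4
  let dirImprenable : Int :=
    (PySem.List.pyRange 0 4 1).foldl (fun acc i =>
      if videInDir fuel pion ((PySem.List.pyGet? directionList (i*2)).getD (0,0)) b0 b1 then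
        acc + 1
      else if videInDir fuel pion ((PySem.List.pyGet? directionList (i*2+1)).getD (0,0)) b0 b1 then
        acc + 1
      else acc) 0
  if dirImprenable == 4 then true else false

-- ===== PORT B =====
def axisPairs : List ((Int × Int) × (Int × Int)) :=
  [((0,1),(0,-1)), ((1,0),(-1,0)), ((1,1),(-1,-1)), ((-1,1),(1,-1))]

-- Source B's while-loop walk, as a tail-recursive loop with the same fuel bound.
def edgeThroughOwn (fuel : Nat) (cur : Int) (d : Int × Int) (own opp : List Int) : Bool :=
  match fuel with
  | 0 => false
  | fuel + 1 =>
    match caseDacote cur d with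
    | none => true
    | some nxt =>
      if nxt ∈ opp ∨ nxt ∉ own then false
      else edgeThroughOwn fuel nxt d own opp

def pionIntouchable_alt (pion : Int) (board : List (List Int)) : Bool :=
  let own := (PySem.List.pyGet? board 0).getD []
  let opp := (PySem.List.pyGet? board 1).getD []
  let fuel := own.length + 1
  axisPairs.all (fun pr =>
    edgeThroughOwn fuel pion pr.1 own opp || edgeThroughOwn fuel pion pr.2 own opp)

-- ===== PRECONDITION & SPEC =====
-- Pre_ excludes boards with fewer than two rows, on which Python's board[1] (or board[0]) raises IndexError.
def Pre_pionIntouchable (pion : Int) (board : List (List Int)) : Prop := 2 ≤ board.length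
instance (pion : Int) (board : List (List Int)) : Decidable (Pre_pionIntouchable pion board) := by unfold Pre_pionIntouchable; infer_instance

def pvWitness_pionIntouchable : Int × List (List Int) := (27, [[19, 28], [35]])

def Spec_pionIntouchable (pion : Int) (board : List (List Int)) (out : Bool) : Prop := out = pionIntouchable_alt pion board
instance (pion : Int) (board : List (List Int)) (out : Bool) : Decidable (Spec_pionIntouchable pion board out) := by unfold Spec_pionIntouchable; infer_instance

-- ===== CLAIM (what is proved, stated in full; the proofs are below) =====
def Claim_equal_pionIntouchable : Prop := ∀ (pion : Int) (board : List (List Int)), Dom_pionIntouchable pion board → Pre_pionIntouchable pion board → Spec_pionIntouchable pion board (pionIntouchable pion board)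

-- ===== LEMMAS AND PROOFS =====

-- the two walks agree for every fuel
theorem walk_eq (fuel : Nat) (place : Int) (dir : Int × Int) (b0 b1 : List Int) :
    videInDir fuel place dir b0 b1 = edgeThroughOwn fuel place dir b0 b1 := by
  induction fuel generalizing place with
  | zero => rfl
  | succ n ih =>
    unfold videInDir edgeThroughOwn
    cases caseDacote place dir with
    | none => rfl
    | some p =>
      by_cases h1 : p ∈ b1
      · simp [h1]
      · by_cases h0 : p ∈ b0 <;> simp [h1, h0, ih]


-- ===== VERDICT (by name: the statement is the Claim_ definition above) =====
theorem pionIntouchable_spec : Claim_equal_pionIntouchable := by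
  intro pion board _ _
  unfold Spec_pionIntouchable pionIntouchable pionIntouchable_alt
  rw [show PySem.List.pyRange 0 4 1 = [0, 1, 2, 3] from by decide]
  simp only [List.foldl, List.all, axisPairs, walk_eq]
  rw [show ((PySem.List.pyGet? directionList ((0:Int)*2)).getD (0,0)) = (0,1) from by decide,
      show ((PySem.List.pyGet? directionList ((0:Int)*2+1)).getD (0,0)) = (0,-1) from by decide,
      show ((PySem.List.pyGet? directionList ((1:Int)*2)).getD (0,0)) = (1,0) from by decide,
      show ((PySem.List.pyGet? directionList ((1:Int)*2+1)).getD (0,0)) = (-1,0) from by decide,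
      show ((PySem.List.pyGet? directionList ((2:Int)*2)).getD (0,0)) = (1,1) from by decide,
      show ((PySem.List.pyGet? directionList ((2:Int)*2+1)).getD (0,0)) = (-1,-1) from by decide,
      show ((PySem.List.pyGet? directionList ((3:Int)*2)).getD (0,0)) = (-1,1) from by decide,
      show ((PySem.List.pyGet? directionList ((3:Int)*2+1)).getD (0,0)) = (1,-1) from by decide]
  generalize edgeThroughOwn (((PySem.List.pyGet? board 0).getD []).length + 1) pion (0,1) ((PySem.List.pyGet? board 0).getD []) ((PySem.List.pyGet? board 1).getD []) = a
  generalize edgeThroughOwn (((PySem.List.pyGet? board 0).getD []).length + 1) pion (0,-1) ((PySem.List.pyGet? board 0).getD []) ((PySem.List.pyGet? board 1).getD []) = b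
  generalize edgeThroughOwn (((PySem.List.pyGet? board 0).getD []).length + 1) pion (1,0) ((PySem.List.pyGet? board 0).getD []) ((PySem.List.pyGet? board 1).getD []) = c
  generalize edgeThroughOwn (((PySem.List.pyGet? board 0).getD []).length + 1) pion (-1,0) ((PySem.List.pyGet? board 0).getD []) ((PySem.List.pyGet? board 1).getD []) = d
  generalize edgeThroughOwn (((PySem.List.pyGet? board 0).getD []).length + 1) pion (1,1) ((PySem.List.pyGet? board 0).getD []) ((PySem.List.pyGet? board 1).getD []) = e
  generalize edgeThroughOwn (((PySem.List.pyGet? board 0).getD []).length + 1) pion (-1,-1) ((PySem.List.pyGet? board 0).getD []) ((PySem.List.pyGet? board 1).getD []) = f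
  generalize edgeThroughOwn (((PySem.List.pyGet? board 0).getD []).length + 1) pion (-1,1) ((PySem.List.pyGet? board 0).getD []) ((PySem.List.pyGet? board 1).getD []) = g
  generalize edgeThroughOwn (((PySem.List.pyGet? board 0).getD []).length + 1) pion (1,-1) ((PySem.List.pyGet? board 0).getD []) ((PySem.List.pyGet? board 1).getD []) = h
  revert a b c d e f g h
  decide
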